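-- pv_equiv track=rewrite | github.com/semmlerino/exhal-master | archive/analysis/analyze_mesen_dumps.py | identify_ranges
-- ===== SOURCE A (Python) =====
-- def identify_ranges(tiles: list[int]) -> list[str]:
--     """Identify continuous ranges in tile list"""
--     if not tiles:
--         return []
--
--     tiles = sorted(tiles)
--     ranges = []
--     start = tiles[0]
--     end = tiles[0]
--
--     for tile in tiles[1:]:
--         if tile == end + 1:
--             end = tile
--         else:
--             if start == end:
--                 ranges.append(str(start))
--             else:
--                 ranges.append(f"{start}-{end}")
--             start = tile
--             end = tile
--
--     # Add final range
--     if start == end: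
--         ranges.append(str(start))
--     else:
--         ranges.append(f"{start}-{end}")
--
--     return ranges
-- ===== SOURCE B (Python) =====
-- def identify_ranges(tiles: list[int]) -> list[str]:
--     """Identify continuous ranges in tile list"""
--     ts = sorted(tiles)
--     if not ts:
--         return []
--     pairs = list(zip(ts, ts[1:]))
--     starts = [ts[0]] + [b for a, b in pairs if b != a + 1]
--     ends = [a for a, b in pairs if b != a + 1] + [ts[-1]]
--     return [str(a) if a == b else f"{a}-{b}" for a, b in zip(starts, ends)]
-- ===== Notes on version B (the rewrite author's own statement) =====
-- stated objective: alternative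
-- what changed: A's stateful scan carrying (ranges, start, end) is replaced by a stateless decomposition: zip the sorted list with its tail, filter the non-consecutive adjacent pairs to get run starts and run ends as two comprehensions, zip them and format.
import Mathlib
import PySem

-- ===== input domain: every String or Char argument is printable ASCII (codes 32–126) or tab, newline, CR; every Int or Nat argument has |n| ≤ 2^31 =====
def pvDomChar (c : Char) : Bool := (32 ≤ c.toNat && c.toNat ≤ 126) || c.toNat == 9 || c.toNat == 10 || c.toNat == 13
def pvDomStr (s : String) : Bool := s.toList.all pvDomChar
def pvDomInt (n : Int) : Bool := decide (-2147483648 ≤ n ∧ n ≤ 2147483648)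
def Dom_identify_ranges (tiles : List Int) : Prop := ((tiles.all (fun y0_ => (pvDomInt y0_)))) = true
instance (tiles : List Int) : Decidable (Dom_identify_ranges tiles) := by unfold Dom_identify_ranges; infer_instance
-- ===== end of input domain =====

-- B replaces A's stateful start/end scan by two stateless filters over adjacent pairs
-- (run starts / run ends) zipped together (objective: alternative decomposition).

-- ===== PORT A =====
-- the for-loop over tiles[1:] with state (ranges, start, end)
def identifyRangesLoopA : List Int → List String → Int → Int → List String
  | [], ranges, s, e =>
      if s = e then ranges ++ [PySem.Int.toStr s]
      else ranges ++ [PySem.Int.toStr s ++ "-" ++ PySem.Int.toStr e]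
  | t :: rest, ranges, s, e =>
      if t = e + 1 then identifyRangesLoopA rest ranges s t
      else
        identifyRangesLoopA rest
          (if s = e then ranges ++ [PySem.Int.toStr s]
           else ranges ++ [PySem.Int.toStr s ++ "-" ++ PySem.Int.toStr e]) t t

def identify_ranges (tiles : List Int) : List String :=
  if tiles = [] then []
  else
    match PySem.List.sorted tiles (fun x => x) false with
    | [] => []                       -- unreachable: sorted of a nonempty list is nonempty
    | t0 :: rest => identifyRangesLoopA rest [] t0 t0   -- start = end = tiles[0]; loop over tiles[1:]

-- ===== PORT B =====
-- str(a) if a == b else f"{a}-{b}"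
def fmtPair (p : Int × Int) : String :=
  if p.1 = p.2 then PySem.Int.toStr p.1
  else PySem.Int.toStr p.1 ++ "-" ++ PySem.Int.toStr p.2

def identify_ranges_alt (tiles : List Int) : List String :=
  let ts := PySem.List.sorted tiles (fun x => x) false
  if ts = [] then []
  else
    let pairs := ts.zip (PySem.List.slice ts (some 1) none)           -- zip(ts, ts[1:])
    -- ts[0] and ts[-1] are guarded by the nonemptiness test above, so the default is never used
    let starts := PySem.List.pyGetD ts 0 0 ::
      (pairs.filter (fun p => p.2 != p.1 + 1)).map Prod.snd
    let ends := (pairs.filter (fun p => p.2 != p.1 + 1)).map Prod.fst ++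
      [PySem.List.pyGetD ts (-1) 0]
    (starts.zip ends).map fmtPair

-- ===== PRECONDITION & SPEC =====
def Spec_identify_ranges (tiles : List Int) (out : List String) : Prop := out = identify_ranges_alt tiles
instance (tiles : List Int) (out : List String) : Decidable (Spec_identify_ranges tiles out) := by unfold Spec_identify_ranges; infer_instance

-- ===== CLAIM (what is proved, stated in full; the proofs are below) =====
def Claim_equal_identify_ranges : Prop := ∀ (tiles : List Int), Dom_identify_ranges tiles → Spec_identify_ranges tiles (identify_ranges tiles)

-- ===== LEMMAS AND PROOFS =====

-- the maximal runs of consecutive values of a list, as (start, end) pairs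
def runsOf : List Int → List (Int × Int)
  | [] => []
  | a :: l =>
    match runsOf l with
    | [] => [(a, a)]
    | (s, e) :: rs => if s = a + 1 then (a, e) :: rs else (a, a) :: (s, e) :: rs

-- A's pending run (s, e) merged in front of the runs of the rest of the list
def mergeRun (s e : Int) : List (Int × Int) → List (Int × Int)
  | [] => [(s, e)]
  | (s', e') :: rs => if s' = e + 1 then (s, e') :: rs else (s, e) :: (s', e') :: rs

lemma mergeRun_self (a : Int) (l : List Int) :
    mergeRun a a (runsOf l) = runsOf (a :: l) := by
  rcases h : runsOf l with _ | ⟨⟨s', e'⟩, rs⟩ <;> simp [runsOf, mergeRun, h]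

lemma runsOf_cons_head (a : Int) (l : List Int) :
    ∃ e rs, runsOf (a :: l) = (a, e) :: rs := by
  rcases h : runsOf l with _ | ⟨⟨s', e'⟩, rs⟩ <;> simp [runsOf, h]
  split_ifs <;> simp

lemma mergeRun_runsOf_cons_of_succ (s e a : Int) (l : List Int) (h : a = e + 1) :
    mergeRun s e (runsOf (a :: l)) = mergeRun s a (runsOf l) := by
  subst h
  rcases h' : runsOf l with _ | ⟨⟨s', e'⟩, rs⟩
  · simp [runsOf, mergeRun, h']
  · by_cases h2 : s' = e + 1 + 1 <;> simp [runsOf, mergeRun, h', h2]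

lemma mergeRun_runsOf_cons_of_ne (s e a : Int) (l : List Int) (h : ¬ a = e + 1) :
    mergeRun s e (runsOf (a :: l)) = (s, e) :: mergeRun a a (runsOf l) := by
  rcases h' : runsOf l with _ | ⟨⟨s', e'⟩, rs⟩
  · simp [runsOf, mergeRun, h, h']
  · by_cases h2 : s' = a + 1 <;> simp [runsOf, mergeRun, h, h', h2]

-- A's loop produces the formatted merged runs appended to the accumulator
lemma loopA_eq (l : List Int) : ∀ (acc : List String) (s e : Int),
    identifyRangesLoopA l acc s e = acc ++ (mergeRun s e (runsOf l)).map fmtPair := by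
  induction l with
  | nil =>
      intro acc s e
      by_cases h : s = e <;> simp [identifyRangesLoopA, runsOf, mergeRun, fmtPair, h]
  | cons a l ih =>
      intro acc s e
      by_cases h : a = e + 1
      · rw [mergeRun_runsOf_cons_of_succ s e a l h]
        simp only [identifyRangesLoopA, if_pos h]
        exact ih acc s a
      · rw [mergeRun_runsOf_cons_of_ne s e a l h]
        rw [mergeRun_self]
        simp only [identifyRangesLoopA, if_neg h]
        rw [ih _ a a, mergeRun_self]
        by_cases h' : s = e <;> simp [fmtPair, h']

-- replacing the first start in a zip of starts with ends
lemma zip_replace_head (a b e : Int) (S ys : List Int) (rs : List (Int × Int))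
    (h : (b :: S).zip ys = (b, e) :: rs) : (a :: S).zip ys = (a, e) :: rs := by
  cases ys with
  | nil => simp at h
  | cons y ys' =>
      rw [List.zip_cons_cons] at h ⊢
      obtain ⟨h1, h2⟩ := List.cons_eq_cons.mp h
      obtain ⟨-, rfl⟩ := Prod.mk.injEq .. ▸ Prod.mk.inj h1
      rw [h2]

-- B's zip of run starts with run ends is exactly the list of runs
lemma zip_starts_ends (l : List Int) : ∀ (a : Int),
    ((a :: (((a :: l).zip l).filter (fun p => p.2 != p.1 + 1)).map Prod.snd).zip
      ((((a :: l).zip l).filter (fun p => p.2 != p.1 + 1)).map Prod.fst ++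
        [(a :: l).getLastD 0])) = runsOf (a :: l) := by
  induction l with
  | nil => intro a; simp [runsOf]
  | cons b m ih =>
      intro a
      have hz : (a :: b :: m).zip (b :: m) = (a, b) :: ((b :: m).zip m) := by simp
      rw [hz]
      have hgl : (a :: b :: m).getLastD 0 = (b :: m).getLastD 0 := by simp
      obtain ⟨e, rs, hr⟩ := runsOf_cons_head b m
      have hrab : runsOf (a :: b :: m) =
          if b = a + 1 then (a, e) :: rs else (a, a) :: (b, e) :: rs := by
        rw [← mergeRun_self, hr]; simp [mergeRun]
      by_cases h : b = a + 1
      · -- (a,b) chains, so it is filtered out and a replaces b as head start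
        rw [List.filter_cons_of_neg (by simp [h]), hgl, hrab, if_pos h]
        exact zip_replace_head a b e _ _ rs (hr ▸ ih b)
      · rw [List.filter_cons_of_pos (by simp [h]), hrab, if_neg h]
        simp only [List.map_cons, List.cons_append, List.zip_cons_cons]
        rw [hgl, ih b, hr]

-- ts[-1] on a nonempty list is the last element
lemma pyGetD_neg_one_getLastD (l : List Int) (h : l ≠ []) :
    PySem.List.pyGetD l (-1) 0 = l.getLastD 0 := by
  rw [PySem.List.pyGetD_neg_one l 0 h, List.getLastD_eq_getLast?,
    List.getLast?_eq_some_getLast h]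
  rfl

-- ===== VERDICT (by name: the statement is the Claim_ definition above) =====
theorem identify_ranges_spec : Claim_equal_identify_ranges := by
  intro tiles _
  unfold Spec_identify_ranges identify_ranges identify_ranges_alt
  by_cases h : tiles = []
  · subst h
    have hs : PySem.List.sorted ([] : List Int) (fun x => x) false = [] :=
      (PySem.List.sorted_eq_nil_iff [] (fun x => x) false).mpr rfl
    simp [hs]
  · rw [if_neg h]
    rcases hts : PySem.List.sorted tiles (fun x => x) false with _ | ⟨t0, rest⟩
    · exact absurd ((PySem.List.sorted_eq_nil_iff tiles (fun x => x) false).mp hts) h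
    · simp only []
      rw [if_neg (by simp)]
      rw [loopA_eq, mergeRun_self, List.nil_append]
      rw [PySem.List.slice_from_one, PySem.List.pyGetD_zero_cons,
        pyGetD_neg_one_getLastD (t0 :: rest) (by simp)]
      simp only [List.tail_cons]
      rw [zip_starts_ends rest t0]
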